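-- pv_equiv track=rewrite | github.com/sockduct/AdventOfCode | 2021/d3p2.py | bindigcnt
-- ===== SOURCE A (Python) =====
-- def bindigcnt(binlist):
--     bintrack = None
--
--     for number in binlist:
--         if bintrack is None:
--             bintrack = [{'0': 0, '1': 0} for _ in range(len(number))]
--         for index, digit in enumerate(number):
--             bintrack[index][digit] += 1
--
--     return bintrack
-- ===== SOURCE B (Python) =====
-- def bindigcnt(binlist):
--     if not binlist:
--         return None
--     width = len(binlist[0])
--     result = []
--     for i in range(width):
--         counts = {'0': 0, '1': 0}
--         for s in binlist:
--             if i < len(s):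
--                 counts[s[i]] += 1
--         result.append(counts)
--     return result
-- ===== Notes on version B (the rewrite author's own statement) =====
-- stated objective: idiomatic
-- what changed: B replaces A's row-by-row fold over an Optional mutable table with a column-by-column pass: for each bit position of the first string it builds a fresh {'0':0,'1':0} dict by scanning that column of every string, so no table and no None-sentinel state exist.
-- outside the precondition, e.g. on bindigcnt([]): A returns None, B returns None
import Mathlib
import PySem

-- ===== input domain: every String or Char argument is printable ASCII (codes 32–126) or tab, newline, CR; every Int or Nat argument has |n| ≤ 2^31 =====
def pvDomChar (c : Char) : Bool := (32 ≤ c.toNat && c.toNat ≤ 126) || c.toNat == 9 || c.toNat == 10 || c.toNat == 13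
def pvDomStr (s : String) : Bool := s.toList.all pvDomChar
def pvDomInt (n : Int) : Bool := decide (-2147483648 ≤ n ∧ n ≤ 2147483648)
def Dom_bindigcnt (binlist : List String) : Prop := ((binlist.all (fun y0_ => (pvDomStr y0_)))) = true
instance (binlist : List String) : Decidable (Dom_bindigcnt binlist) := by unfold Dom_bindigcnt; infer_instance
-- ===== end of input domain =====

-- B counts column-by-column (one fresh two-key dict per bit position) instead of A's row-by-row
-- fold over an Optional table of dicts; same values on Pre_, objective: idiomatic decomposition.

-- ===== PORT A =====
-- bintrack[index][digit] += 1: Dict.modify with default 0 equals Python's increment whenever the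
-- key is present (Pre_ guarantees digits are '0'/'1'); List.modify is a no-op out of range where
-- Python raises IndexError — those inputs are outside Pre_.
def bindigcnt (binlist : List String) : List (List (String × Int)) :=
  -- bt is Python's bintrack after the outer loop
  ((binlist.foldl
      (fun bt number =>
        let bt0 := match bt with
          | none => List.replicate number.toList.length (PySem.Dict.ofList [("0", 0), ("1", 0)])
          | some b => b
        some ((PySem.List.enumerate number.toList 0).foldl
          (fun b p => b.modify p.1.toNat (fun d => d.modify (String.ofList [p.2]) 0 (· + 1))) bt0))
      (none : Option (List (PySem.Dict String Int)))).getD []).map (fun d => d.items)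
  -- Python returns the list of dicts (None, i.e. not a value of the return type, on []: outside Pre_)

-- ===== PORT B =====
-- column-by-column; counts[s[i]] += 1 (KeyError outside '0'/'1' is outside Pre_, so modify with
-- default 0 is exact there); on [] the Python B returns None — outside Pre_, port returns [].
def bindigcnt_alt (binlist : List String) : List (List (String × Int)) :=
  match binlist with
  | [] => []
  | s0 :: _ =>
    (List.range s0.toList.length).map (fun i =>
      (binlist.foldl
        (fun counts t =>
          if i < t.toList.length then
            counts.modify (String.ofList [t.toList.getD i ' ']) 0 (· + 1)
          else counts)
        (PySem.Dict.ofList [("0", 0), ("1", 0)])).items)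

-- ===== PRECONDITION & SPEC =====
-- Pre_ excludes: [] (A returns None, not a value of the return type); any string with a character
-- other than '0'/'1' (A raises KeyError); any string longer than the first (A raises IndexError).
def Pre_bindigcnt (binlist : List String) : Prop :=
  binlist ≠ [] ∧
  ∀ s ∈ binlist, s.toList.length ≤ (binlist.headD "").toList.length ∧
    (s.toList.all (fun c => c == '0' || c == '1')) = true
instance (binlist : List String) : Decidable (Pre_bindigcnt binlist) := by
  unfold Pre_bindigcnt; infer_instance

def pvWitness_bindigcnt : List String := ["01", "10", "1"]

def Spec_bindigcnt (binlist : List String) (out : List (List (String × Int))) : Prop := out = bindigcnt_alt binlist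
instance (binlist : List String) (out : List (List (String × Int))) : Decidable (Spec_bindigcnt binlist out) := by unfold Spec_bindigcnt; infer_instance

-- ===== CLAIM (what is proved, stated in full; the proofs are below) =====
def Claim_equal_bindigcnt : Prop := ∀ (binlist : List String), Dom_bindigcnt binlist → Pre_bindigcnt binlist → Spec_bindigcnt binlist (bindigcnt binlist)

-- ===== LEMMAS AND PROOFS =====

-- number of strings in l whose i-th character is c
def pvCnt (l : List String) (i : Nat) (c : Char) : Int :=
  ((l.filter (fun s => s.toList[i]? == some c)).length : Int)

-- the column-i dict both programs build
def pvCol (l : List String) (i : Nat) : PySem.Dict String Int :=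
  PySem.Dict.mk [("0", pvCnt l i '0'), ("1", pvCnt l i '1')]

lemma pvCnt_cons (l : List String) (t : String) (i : Nat) (c : Char) :
    pvCnt (t :: l) i c = (if t.toList[i]? = some c then 1 else 0) + pvCnt l i c := by
  simp only [pvCnt, List.filter_cons]
  split_ifs with h <;> simp_all
  omega

lemma pvCnt_append_one (p : List String) (t : String) (j : Nat) (c : Char) :
    pvCnt (p ++ [t]) j c = pvCnt p j c + (if t.toList[j]? = some c then 1 else 0) := by
  simp only [pvCnt, List.filter_append]
  split_ifs with h <;> simp_all

-- B's inner loop over one column characterised via pvCnt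
lemma B_col (i : Nat) : ∀ (l : List String) (a b : Int),
    (∀ s ∈ l, ∀ c ∈ s.toList, c = '0' ∨ c = '1') →
    (l.foldl
      (fun counts t =>
        if i < t.toList.length then
          counts.modify (String.ofList [t.toList.getD i ' ']) 0 (· + 1)
        else counts)
      (PySem.Dict.mk [("0", a), ("1", b)]))
    = PySem.Dict.mk [("0", a + pvCnt l i '0'), ("1", b + pvCnt l i '1')] := by
  intro l
  induction l with
  | nil => intro a b _; simp [pvCnt]
  | cons t l ih =>
    intro a b hb
    have hbt := hb t (by simp)
    have hl : ∀ s ∈ l, ∀ c ∈ s.toList, c = '0' ∨ c = '1' := fun s hs => hb s (by simp [hs])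
    rw [List.foldl_cons]
    by_cases h : i < t.toList.length
    · have hg : t.toList.getD i ' ' = t.toList[i] := List.getD_eq_getElem _ _ h
      have hsome : t.toList[i]? = some t.toList[i] := List.getElem?_eq_getElem h
      rcases hbt t.toList[i] (List.getElem_mem h) with h0 | h1
      · rw [if_pos h, hg, h0]
        have hred : (PySem.Dict.mk [("0", a), ("1", b)]).modify (String.ofList ['0']) 0 (· + 1)
            = PySem.Dict.mk [("0", a + 1), ("1", b)] := rfl
        rw [hred, ih (a+1) b hl, pvCnt_cons, pvCnt_cons, hsome, h0]
        simp
        ring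
      · rw [if_pos h, hg, h1]
        have hred : (PySem.Dict.mk [("0", a), ("1", b)]).modify (String.ofList ['1']) 0 (· + 1)
            = PySem.Dict.mk [("0", a), ("1", b + 1)] := rfl
        rw [hred, ih a (b+1) hl, pvCnt_cons, pvCnt_cons, hsome, h1]
        simp
        ring
    · have hnone : t.toList[i]? = none := by
        rw [List.getElem?_eq_none_iff]; omega
      rw [if_neg h, ih a b hl, pvCnt_cons, pvCnt_cons, hnone]
      simp

-- A's per-string inner pass, abstracted: bump column j with character cs[j]
def pvApply : List Char → List (PySem.Dict String Int) → List (PySem.Dict String Int)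
  | [], l => l
  | _ :: _, [] => []
  | c :: cs, d :: l => d.modify (String.ofList [c]) 0 (· + 1) :: pvApply cs l

lemma pvApply_length (cs : List Char) (l : List (PySem.Dict String Int)) :
    (pvApply cs l).length = l.length := by
  induction cs generalizing l with
  | nil => rfl
  | cons c cs ih => cases l with
    | nil => rfl
    | cons d l => simp [pvApply, ih]

lemma pvApply_getElem (cs : List Char) : ∀ (l : List (PySem.Dict String Int)) (j : Nat)
    (hj : j < l.length),
    (pvApply cs l)[j]'(by rw [pvApply_length]; exact hj)
      = if h : j < cs.length then l[j].modify (String.ofList [cs[j]]) 0 (· + 1) else l[j] := by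
  induction cs with
  | nil => intro l j hj; simp [pvApply]
  | cons c cs ih =>
    intro l j hj
    cases l with
    | nil => simp at hj
    | cons d l =>
      cases j with
      | zero => simp [pvApply]
      | succ j =>
        have := ih l j (by simpa using hj)
        simpa [pvApply] using this

-- A's inner enumerate-fold is pvApply after the offset
lemma inner_eq (cs : List Char) : ∀ (k : Nat) (A : List (PySem.Dict String Int)),
    (PySem.List.enumerate cs (k : Int)).foldl
      (fun b p => b.modify p.1.toNat (fun d => d.modify (String.ofList [p.2]) 0 (· + 1))) A
    = A.take k ++ pvApply cs (A.drop k) := by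
  induction cs with
  | nil => intro k A; simp [PySem.List.enumerate_nil, pvApply]
  | cons c cs ih =>
    intro k A
    rw [PySem.List.enumerate_cons, List.foldl_cons]
    have hcast : (k : Int) + 1 = ((k + 1 : Nat) : Int) := by push_cast; ring
    rw [hcast, ih (k + 1)]
    simp only [Int.toNat_natCast]
    by_cases hk : k < A.length
    · rw [List.modify_eq_take_cons_drop hk]
      rw [List.drop_eq_getElem_cons hk]
      have h1 : (A.take k ++ A[k].modify (String.ofList [c]) 0 (· + 1) :: A.drop (k + 1)).take (k+1)
          = A.take k ++ [A[k].modify (String.ofList [c]) 0 (· + 1)] := by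
        rw [show k + 1 = (A.take k).length + 1 by simp [List.length_take]; omega]
        simp [List.take_append]
      have h2 : (A.take k ++ A[k].modify (String.ofList [c]) 0 (· + 1) :: A.drop (k + 1)).drop (k+1)
          = A.drop (k + 1) := by
        rw [show k + 1 = (A.take k).length + 1 by simp [List.length_take]; omega]
        simp [List.drop_append]
      rw [h1, h2, pvApply]
      simp
    · have hge : A.length ≤ k := by omega
      rw [List.modify_eq_self hge]
      rw [List.drop_eq_nil_of_le hge, List.drop_eq_nil_of_le (by omega)]
      rw [List.take_of_length_le hge, List.take_of_length_le (by omega)]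
      cases cs <;> simp [pvApply]

-- processing one admissible string over the column table
lemma step_eq (w : Nat) (p : List String) (t : String)
    (hbin : ∀ c ∈ t.toList, c = '0' ∨ c = '1') :
    pvApply t.toList ((List.range w).map (pvCol p)) = (List.range w).map (pvCol (p ++ [t])) := by
  apply List.ext_getElem
  · simp [pvApply_length]
  · intro j h1 h2
    have hjw : j < w := by simpa using h2
    have hjl : j < ((List.range w).map (pvCol p)).length := by simpa
    rw [pvApply_getElem t.toList _ j hjl]
    simp only [List.getElem_map, List.getElem_range]
    by_cases hj : j < t.toList.length
    · rw [dif_pos hj]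
      have hsome : t.toList[j]? = some t.toList[j] := List.getElem?_eq_getElem hj
      rcases hbin t.toList[j] (List.getElem_mem hj) with h0 | h1c
      · rw [h0]
        show (PySem.Dict.mk [("0", pvCnt p j '0'), ("1", pvCnt p j '1')]).modify (String.ofList ['0']) 0 (· + 1) = _
        have hred : ∀ a b : Int, (PySem.Dict.mk [("0", a), ("1", b)]).modify (String.ofList ['0']) 0 (· + 1)
            = PySem.Dict.mk [("0", a + 1), ("1", b)] := fun a b => rfl
        rw [hred]
        simp [pvCol, pvCnt_append_one, hsome, h0]
      · rw [h1c]
        show (PySem.Dict.mk [("0", pvCnt p j '0'), ("1", pvCnt p j '1')]).modify (String.ofList ['1']) 0 (· + 1) = _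
        have hred : ∀ a b : Int, (PySem.Dict.mk [("0", a), ("1", b)]).modify (String.ofList ['1']) 0 (· + 1)
            = PySem.Dict.mk [("0", a), ("1", b + 1)] := fun a b => rfl
        rw [hred]
        simp [pvCol, pvCnt_append_one, hsome, h1c]
    · rw [dif_neg hj]
      have hnone : t.toList[j]? = none := by rw [List.getElem?_eq_none_iff]; omega
      simp [pvCol, pvCnt_append_one, hnone]

-- A's per-string step as it appears in the port
def pvStep (b : List (PySem.Dict String Int)) (number : String) : List (PySem.Dict String Int) :=
  (PySem.List.enumerate number.toList 0).foldl
    (fun b p => b.modify p.1.toNat (fun d => d.modify (String.ofList [p.2]) 0 (· + 1))) b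

lemma pvStep_eq (w : Nat) (p : List String) (t : String)
    (hbin : ∀ c ∈ t.toList, c = '0' ∨ c = '1') :
    pvStep ((List.range w).map (pvCol p)) t = (List.range w).map (pvCol (p ++ [t])) := by
  have h := inner_eq t.toList 0 ((List.range w).map (pvCol p))
  simp only [Nat.cast_zero, List.take_zero, List.drop_zero, List.nil_append] at h
  unfold pvStep
  rw [h]
  exact step_eq w p t hbin

-- once the state is `some`, A's outer fold is a plain fold of pvStep
lemma outer_some :
    ∀ (rest : List String) (bt : List (PySem.Dict String Int)),
    rest.foldl
      (fun (o : Option (List (PySem.Dict String Int))) number =>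
        let bt0 := match o with
          | none => List.replicate number.toList.length (PySem.Dict.ofList [("0", 0), ("1", 0)])
          | some b => b
        some ((PySem.List.enumerate number.toList 0).foldl
          (fun b p => b.modify p.1.toNat (fun d => d.modify (String.ofList [p.2]) 0 (· + 1))) bt0))
      (some bt)
    = some (rest.foldl pvStep bt) := by
  intro rest
  induction rest with
  | nil => intro bt; rfl
  | cons t rest ih => intro bt; rw [List.foldl_cons, List.foldl_cons]; exact ih (pvStep bt t)

lemma outer_inv (w : Nat) : ∀ (rest p : List String),
    (∀ s ∈ rest, ∀ c ∈ s.toList, c = '0' ∨ c = '1') →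
    rest.foldl pvStep ((List.range w).map (pvCol p)) = (List.range w).map (pvCol (p ++ rest)) := by
  intro rest
  induction rest with
  | nil => intro p _; simp
  | cons t rest ih =>
    intro p hb
    rw [List.foldl_cons, pvStep_eq w p t (hb t (by simp)),
        ih (p ++ [t]) (fun s hs => hb s (by simp [hs]))]
    simp

-- ===== VERDICT (by name: the statement is the Claim_ definition above) =====
theorem bindigcnt_spec : Claim_equal_bindigcnt := by
  intro binlist _ hpre
  obtain ⟨hne, hall⟩ := hpre
  unfold Spec_bindigcnt
  cases binlist with
  | nil => exact absurd rfl hne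
  | cons s0 rest =>
    have hbin : ∀ s ∈ (s0 :: rest), ∀ c ∈ s.toList, c = '0' ∨ c = '1' := by
      intro s hs c hc
      have := List.all_eq_true.mp ((hall s hs).2) c hc
      simpa using this
    -- A side
    have hbase : List.replicate s0.toList.length (PySem.Dict.ofList [("0", (0:Int)), ("1", 0)])
        = (List.range s0.toList.length).map (pvCol []) := by
      rw [show pvCol ([] : List String) = (fun _ : Nat => PySem.Dict.ofList [("0", (0:Int)), ("1", 0)]) from
            funext (fun i => rfl)]
      simp [List.map_const']
    have hA : bindigcnt (s0 :: rest)
        = ((List.range s0.toList.length).map (pvCol (s0 :: rest))).map (fun d => d.items) := by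
      have hfirst : pvStep ((List.range s0.toList.length).map (pvCol [])) s0
          = (List.range s0.toList.length).map (pvCol [s0]) := by
        simpa using pvStep_eq s0.toList.length [] s0 (hbin s0 (by simp))
      unfold bindigcnt
      rw [List.foldl_cons]
      show ((List.foldl _ (some (pvStep
              (List.replicate s0.toList.length (PySem.Dict.ofList [("0", 0), ("1", 0)])) s0))
            rest).getD []).map (fun d : PySem.Dict String Int => d.items) = _
      rw [outer_some, hbase, hfirst,
          outer_inv s0.toList.length rest [s0] (fun s hs => hbin s (by simp [hs]))]
      simp
    -- B side
    have hB : bindigcnt_alt (s0 :: rest)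
        = ((List.range s0.toList.length).map (pvCol (s0 :: rest))).map (fun d => d.items) := by
      unfold bindigcnt_alt
      rw [List.map_map]
      apply List.map_congr_left
      intro i _
      show ((s0 :: rest).foldl _ (PySem.Dict.ofList [("0", 0), ("1", 0)])).items = _
      rw [show PySem.Dict.ofList [("0", (0:Int)), ("1", 0)]
            = PySem.Dict.mk [("0", 0), ("1", 0)] from rfl]
      rw [B_col i (s0 :: rest) 0 0 hbin]
      simp [pvCol]
    rw [hA, hB]
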